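-- pv_equiv track=rewrite | github.com/letminjae/PCCP | Programmers/LV1/240530/2.py | solution
-- ===== SOURCE A (Python) =====
-- def solution(nums):
--     answer = []
--     n = len(nums) // 2
--
--     for i in range(len(nums)):
--         if len(answer) < n:
--             if nums[i] not in answer:
--                 answer.append(nums[i])
--
--     return len(answer)
-- ===== SOURCE B (Python) =====
-- def solution(nums):
--     return min(len(set(nums)), len(nums) // 2)
-- ===== Notes on version B (the rewrite author's own statement) =====
-- stated objective: simpler
-- what changed: Replaced the capped accumulation loop with repeated list-membership tests by a closed form: min of the number of distinct values (set cardinality) and len(nums)//2.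
import Mathlib
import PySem

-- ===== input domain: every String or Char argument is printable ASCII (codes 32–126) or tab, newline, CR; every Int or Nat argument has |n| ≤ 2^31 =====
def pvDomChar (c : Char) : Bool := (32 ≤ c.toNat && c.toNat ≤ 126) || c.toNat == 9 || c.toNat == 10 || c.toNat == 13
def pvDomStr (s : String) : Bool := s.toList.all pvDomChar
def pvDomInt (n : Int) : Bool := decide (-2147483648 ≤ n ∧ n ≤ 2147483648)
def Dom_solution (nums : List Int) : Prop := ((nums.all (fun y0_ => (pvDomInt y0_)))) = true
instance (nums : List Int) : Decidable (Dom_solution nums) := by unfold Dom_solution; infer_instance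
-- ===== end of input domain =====

-- B replaces A's capped accumulation loop by the closed form min(#distinct, len//2); simpler.

-- ===== PORT A =====
-- for i in range(len(nums)): if len(answer) < n and nums[i] not in answer: answer.append(nums[i])
-- nums[i] ported with pyGetD (exact: every index of range(len(nums)) is in range)
def solution (nums : List Int) : Int :=
  let n : Int := PySem.Int.floordiv (nums.length : Int) 2
  let answer : List Int :=
    (PySem.List.pyRange 0 (nums.length : Int) 1).foldl
      (fun answer i =>
        if (answer.length : Int) < n then
          if PySem.List.pyGetD nums i 0 ∈ answer then answer
          else answer ++ [PySem.List.pyGetD nums i 0]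
        else answer) []
  (answer.length : Int)

-- ===== PORT B =====
def solution_alt (nums : List Int) : Int :=
  min ((PySem.Set.ofList nums).length : Int) (PySem.Int.floordiv (nums.length : Int) 2)

-- ===== PRECONDITION & SPEC =====
def Spec_solution (nums : List Int) (out : Int) : Prop := out = solution_alt nums
instance (nums : List Int) (out : Int) : Decidable (Spec_solution nums out) := by unfold Spec_solution; infer_instance

-- ===== CLAIM (what is proved, stated in full; the proofs are below) =====
def Claim_equal_solution : Prop := ∀ (nums : List Int), Dom_solution nums → Spec_solution nums (solution nums)

-- ===== LEMMAS AND PROOFS =====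

-- once the accumulator is full, the loop is the identity
theorem pv_fold_full (n : Int) (xs : List Int) (acc : List Int) (h : ¬ (acc.length : Int) < n) :
    xs.foldl
      (fun answer x =>
        if (answer.length : Int) < n then
          if x ∈ answer then answer else answer ++ [x]
        else answer) acc = acc := by
  induction xs with
  | nil => rfl
  | cons x t ih => simp [List.foldl, if_neg h, ih]

-- the set-building fold never shrinks the accumulator
theorem pv_set_fold_len_le (xs : List Int) (acc : List Int) :
    acc.length ≤ (xs.foldl PySem.Set.add acc).length := by
  induction xs generalizing acc with
  | nil => simp
  | cons x t ih =>
    refine le_trans ?_ (ih (PySem.Set.add acc x))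
    simp [PySem.Set.add]
    split <;> simp

-- main invariant: capped loop length = min n (distinct count)
theorem pv_loop_len (n : Int) (xs : List Int) (acc : List Int)
    (hacc : (acc.length : Int) ≤ n) :
    ((xs.foldl
      (fun answer x =>
        if (answer.length : Int) < n then
          if x ∈ answer then answer else answer ++ [x]
        else answer) acc).length : Int)
      = min ((xs.foldl PySem.Set.add acc).length : Int) n := by
  induction xs generalizing acc with
  | nil => simpa using (min_eq_left hacc).symm
  | cons x t ih =>
    by_cases hlt : (acc.length : Int) < n
    · by_cases hmem : x ∈ acc
      · have hadd : PySem.Set.add acc x = acc := by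
          simp [PySem.Set.add, PySem.Set.contains, hmem]
        simp only [List.foldl, if_pos hlt, if_pos hmem, hadd]
        exact ih acc hacc
      · have hadd : PySem.Set.add acc x = acc ++ [x] := by
          simp [PySem.Set.add, PySem.Set.contains, hmem]
        have hlen : ((acc ++ [x]).length : Int) ≤ n := by
          simp; omega
        simp only [List.foldl, if_pos hlt, if_neg hmem, hadd]
        exact ih (acc ++ [x]) hlen
    · have heq : (acc.length : Int) = n := le_antisymm hacc (by omega)
      rw [pv_fold_full n (x :: t) acc hlt]
      have hge : acc.length ≤ ((x :: t).foldl PySem.Set.add acc).length :=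
        pv_set_fold_len_le (x :: t) acc
      have : n ≤ (((x :: t).foldl PySem.Set.add acc).length : Int) := by
        rw [← heq]; exact_mod_cast hge
      omega

-- ===== VERDICT (by name: the statement is the Claim_ definition above) =====
theorem solution_spec : Claim_equal_solution := by
  intro nums _
  show solution nums = solution_alt nums
  simp only [solution, solution_alt]
  rw [PySem.List.foldl_pyRange_zero_pyGetD' nums 0
      (fun answer x =>
        if (answer.length : Int) < (PySem.Int.floordiv (nums.length : Int) 2) then
          if x ∈ answer then answer else answer ++ [x]
        else answer) []]
  rw [PySem.Set.ofList_eq_foldl]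
  have h0 : ((([] : List Int)).length : Int) ≤ PySem.Int.floordiv (nums.length : Int) 2 := by
    have : (0:Int) ≤ PySem.Int.floordiv (nums.length : Int) 2 := by
      rw [PySem.Int.floordiv_eq_ediv_of_pos (by norm_num)]
      exact Int.ediv_nonneg (by positivity) (by norm_num)
    simpa using this
  rw [pv_loop_len _ nums [] h0]
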